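-- pv_equiv track=rewrite | github.com/Xuyan923r/OPD | slime/rollout/on_policy_distillation.py | _extract_braced_content
-- ===== SOURCE A (Python) =====
-- def _extract_braced_content(text: str, open_brace_index: int) -> tuple[str | None, int | None]:
--     if open_brace_index >= len(text) or text[open_brace_index] != "{":
--         return None, None
--
--     depth = 0
--     chars: list[str] = []
--     for index in range(open_brace_index, len(text)):
--         char = text[index]
--         if char == "{":
--             if depth > 0:
--                 chars.append(char)
--             depth += 1
--         elif char == "}":
--             depth -= 1
--             if depth < 0:
--                 return None, None
--             if depth == 0:
--                 return "".join(chars).strip(), index + 1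
--             chars.append(char)
--         elif depth > 0:
--             chars.append(char)
--
--     return None, None
-- ===== SOURCE B (Python) =====
-- def _extract_braced_content(text: str, open_brace_index: int) -> tuple[str | None, int | None]:
--     n = len(text)
--     if not (0 <= open_brace_index < n) or text[open_brace_index] != "{":
--         return None, None
--     depth = 0
--     for index in range(open_brace_index, n):
--         char = text[index]
--         if char == "{":
--             depth += 1
--         elif char == "}":
--             depth -= 1
--             if depth == 0:
--                 return text[open_brace_index + 1:index].strip(), index + 1
--     return None, None
-- ===== Notes on version B (the rewrite author's own statement) =====
-- stated objective: simpler
-- what changed: B maintains no character buffer: a single depth counter finds the matching close brace and the content is produced once as the slice text[open_brace_index+1:index].strip(), and B validates the start index as 0 <= open_brace_index < len(text) instead of inheriting Python negative-index wraparound.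
-- intended difference: For -len(text) <= open_brace_index < 0 with a '{' at the wrapped position whose brace gets matched during A's scan, A returns wraparound-artefact content with a close index offset from the wrong origin, while B returns (None,None), the intended rejection of an out-of-range start index. — e.g. on _extract_braced_content("x{a}", -3): A returns (some "a", some 0), B returns (none, none)
import Mathlib
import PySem

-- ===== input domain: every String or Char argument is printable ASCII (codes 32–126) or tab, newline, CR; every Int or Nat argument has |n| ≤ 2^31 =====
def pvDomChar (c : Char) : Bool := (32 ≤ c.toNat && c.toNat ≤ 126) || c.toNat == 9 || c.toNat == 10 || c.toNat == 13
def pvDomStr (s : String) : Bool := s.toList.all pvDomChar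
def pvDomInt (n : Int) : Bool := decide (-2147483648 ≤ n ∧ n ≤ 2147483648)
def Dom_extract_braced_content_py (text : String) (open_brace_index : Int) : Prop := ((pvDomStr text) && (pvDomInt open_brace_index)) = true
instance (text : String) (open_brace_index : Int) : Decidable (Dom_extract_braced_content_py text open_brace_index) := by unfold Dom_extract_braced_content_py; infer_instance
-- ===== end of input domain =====

-- B drops A's character buffer: it keeps only the brace depth and returns the slice
-- text[open_brace_index+1:index].strip() at the matching close (objective: simpler).
-- B also rejects a negative open_brace_index, where A's returned value is a
-- negative-index wraparound artefact (the intended difference stated in D_ below).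

-- ===== PORT A =====
-- Transliteration of A's for-loop over range(open_brace_index, len(text)); depth and
-- the chars buffer are the loop state, branches in A's order.  text[index] is pyGet?;
-- '.getD' is exact here: every index the loop visits is in range once the initial
-- guard's text[open_brace_index] access succeeded.
def pyA_loop (s : List Char) (depth : Int) (chars : List Char) : List Int → Option String × Option Int
  | [] => (none, none)
  | i :: rest =>
    let c := (PySem.List.pyGet? s i).getD ' '
    if c = '{' then
      pyA_loop s (depth + 1) (if depth > 0 then chars ++ [c] else chars) rest
    else if c = '}' then
      if depth - 1 < 0 then (none, none)
      else if depth - 1 = 0 then (some (PySem.Str.strip (String.ofList chars)), some (i + 1))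
      else pyA_loop s (depth - 1) (chars ++ [c]) rest
    else if depth > 0 then pyA_loop s depth (chars ++ [c]) rest
    else pyA_loop s depth chars rest

-- guard: text[open_brace_index] with pyGet? = none is Python's IndexError, excluded by
-- Pre_; there '.getD ' '' ≠ '{' yields (none, none), claimed about no input.
def extract_braced_content_py (text : String) (open_brace_index : Int) : Option String × Option Int :=
  if (text.toList.length : Int) ≤ open_brace_index then (none, none)
  else if (PySem.List.pyGet? text.toList open_brace_index).getD ' ' ≠ '{' then (none, none)
  else pyA_loop text.toList 0 [] (PySem.List.pyRange open_brace_index (text.toList.length : Int) 1)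

-- ===== PORT B =====
-- Transliteration of B: one forward scan keeping only the depth; on the matching
-- close it returns the stripped slice text[open_brace_index+1:index] and index+1.
def pyB_loop (s : List Char) (start i : Nat) (depth : Int) : Option String × Option Int :=
  if h : i < s.length then
    let c := s[i]
    let depth' := if c = '{' then depth + 1 else if c = '}' then depth - 1 else depth
    if c = '}' ∧ depth' = 0 then
      (some (PySem.Str.strip (String.ofList (PySem.List.slice s (some ((start : Int) + 1)) (some (i : Int))))),
       some ((i : Int) + 1))
    else pyB_loop s start (i + 1) depth'
  else (none, none)
termination_by s.length - i

def extract_braced_content_py_alt (text : String) (open_brace_index : Int) : Option String × Option Int :=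
  if 0 ≤ open_brace_index ∧ open_brace_index < (text.toList.length : Int) ∧
      text.toList.getD open_brace_index.toNat ' ' = '{'
  then pyB_loop text.toList open_brace_index.toNat open_brace_index.toNat 0
  else (none, none)

-- ===== PRECONDITION & SPEC =====
-- Pre_ excludes only open_brace_index < -len(text), where A raises IndexError on text[open_brace_index].
def Pre_extract_braced_content_py (text : String) (open_brace_index : Int) : Prop :=
  -(text.toList.length : Int) ≤ open_brace_index
instance (text : String) (open_brace_index : Int) : Decidable (Pre_extract_braced_content_py text open_brace_index) := by unfold Pre_extract_braced_content_py; infer_instance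

def pvWitness_extract_braced_content_py : String × Int := ("{a}", 0)

-- On -len(text) ≤ open_brace_index < 0 with a '{' at the wrapped position that gets matched
-- during A's scan, A returns a negative-index wraparound artefact: content gathered by a scan
-- that starts before position 0, with a close index offset from the wrong origin; B returns
-- (None, None), the intended rejection of an out-of-range start index.
def D_extract_braced_content_py (text : String) (open_brace_index : Int) : Prop :=
  open_brace_index < 0 ∧ -(text.toList.length : Int) ≤ open_brace_index ∧
  (let w := text.toList.drop ((text.toList.length : Int) + open_brace_index).toNat ++ text.toList
   w.head? = some '{' ∧ ∃ j, j < w.length + 1 ∧ (1 ≤ j ∧ (w.take j).count '{' ≤ (w.take j).count '}'))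
instance (text : String) (open_brace_index : Int) : Decidable (D_extract_braced_content_py text open_brace_index) := by unfold D_extract_braced_content_py; infer_instance

def Spec_extract_braced_content_py (text : String) (open_brace_index : Int) (out : Option String × Option Int) : Prop := ¬ D_extract_braced_content_py text open_brace_index → out = extract_braced_content_py_alt text open_brace_index
instance (text : String) (open_brace_index : Int) (out : Option String × Option Int) : Decidable (Spec_extract_braced_content_py text open_brace_index out) := by unfold Spec_extract_braced_content_py; infer_instance

def pvDiffWitness_extract_braced_content_py : String × Int := ("x{a}", -3)
def pvDiffWitnessOut_extract_braced_content_py : (Option String × Option Int) × (Option String × Option Int) :=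
  ((some "a", some 0), (none, none))

-- ===== CLAIM (what is proved, stated in full; the proofs are below) =====
def Claim_unchanged_extract_braced_content_py : Prop := ∀ (text : String) (open_brace_index : Int), Dom_extract_braced_content_py text open_brace_index → Pre_extract_braced_content_py text open_brace_index → Spec_extract_braced_content_py text open_brace_index (extract_braced_content_py text open_brace_index)
def Claim_changed_extract_braced_content_py : Prop := Dom_extract_braced_content_py (pvDiffWitness_extract_braced_content_py.1) (pvDiffWitness_extract_braced_content_py.2) ∧ Pre_extract_braced_content_py (pvDiffWitness_extract_braced_content_py.1) (pvDiffWitness_extract_braced_content_py.2) ∧ D_extract_braced_content_py (pvDiffWitness_extract_braced_content_py.1) (pvDiffWitness_extract_braced_content_py.2) ∧ extract_braced_content_py (pvDiffWitness_extract_braced_content_py.1) (pvDiffWitness_extract_braced_content_py.2) = pvDiffWitnessOut_extract_braced_content_py.1 ∧ extract_braced_content_py_alt (pvDiffWitness_extract_braced_content_py.1) (pvDiffWitness_extract_braced_content_py.2) = pvDiffWitnessOut_extract_braced_content_py.2 ∧ pvDiffWitnessOut_extract_braced_content_py.1 ≠ pvDiffWitnessOut_extract_braced_content_py.2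
def Claim_exact_extract_braced_content_py : Prop := ∀ (text : String) (open_brace_index : Int), Dom_extract_braced_content_py text open_brace_index → Pre_extract_braced_content_py text open_brace_index → D_extract_braced_content_py text open_brace_index → extract_braced_content_py text open_brace_index ≠ extract_braced_content_py_alt text open_brace_index

-- ===== LEMMAS AND PROOFS =====

-- brace balance of a prefix (proof-side characterisation of the loops' depth)
def balStep (d : Int) (c : Char) : Int := if c = '{' then d + 1 else if c = '}' then d - 1 else d
def balFrom (d : Int) (l : List Char) : Int := l.foldl balStep d

lemma balFrom_append_singleton (d : Int) (l : List Char) (c : Char) :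
    balFrom d (l ++ [c]) = balStep (balFrom d l) c := by
  simp [balFrom, List.foldl_append]

lemma balFrom_count : ∀ (l : List Char) (d : Int),
    balFrom d l = d + (l.count '{' : Int) - (l.count '}' : Int) := by
  intro l
  induction l with
  | nil => intro d; simp [balFrom]
  | cons c t ih =>
    intro d
    rw [show balFrom d (c :: t) = balFrom (balStep d c) t from rfl, ih]
    by_cases h1 : c = '{'
    · subst h1; simp [balStep, List.count_cons]; push_cast; ring
    · by_cases h2 : c = '}'
      · subst h2; simp [balStep, List.count_cons]; push_cast; ring
      · have h1' : ('{' : Char) ≠ c := fun h => h1 h.symm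
        have h2' : ('}' : Char) ≠ c := fun h => h2 h.symm
        simp [balStep, List.count_cons, h1, h2, h1', h2']

lemma bal_take_succ_ge (w : List Char) (j : Nat) :
    balFrom 0 (w.take j) - 1 ≤ balFrom 0 (w.take (j + 1)) := by
  by_cases h : j < w.length
  · rw [List.take_succ, List.getElem?_eq_getElem h]
    simp only [Option.toList_some]
    rw [balFrom_append_singleton]
    unfold balStep; split_ifs <;> omega
  · rw [List.take_of_length_le (by omega), List.take_of_length_le (by omega)]
    omega

lemma bal_ivt (w : List Char) (hf1 : balFrom 0 (w.take 1) = 1) :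
    ∀ j, 1 ≤ j → balFrom 0 (w.take j) ≤ 0 →
      ∃ k, 1 ≤ k ∧ k ≤ j ∧ balFrom 0 (w.take k) = 0 := by
  intro j
  induction j with
  | zero => omega
  | succ j ih =>
    intro h1j hle
    by_cases h0 : balFrom 0 (w.take (j + 1)) = 0
    · exact ⟨j + 1, by omega, by omega, h0⟩
    · have hj1 : 1 ≤ j := by
        by_contra h
        have hz : j = 0 := by omega
        rw [hz] at hle
        simp only [Nat.zero_add] at hle
        omega
      have hprev : balFrom 0 (w.take j) ≤ 0 := by
        have := bal_take_succ_ge w j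
        omega
      obtain ⟨k, hk1, hk2, hk0⟩ := ih hj1 hprev
      exact ⟨k, hk1, by omega, hk0⟩

def chA (s : List Char) (i : Int) : Char := (PySem.List.pyGet? s i).getD ' '

lemma pyA_loop_none (s : List Char) (idxs : List Int) (d : Int) (chars : List Char)
    (hd : 1 ≤ d)
    (h : ∀ j, 1 ≤ j → j ≤ idxs.length → balFrom d ((idxs.map (chA s)).take j) ≠ 0) :
    pyA_loop s d chars idxs = (none, none) := by
  induction idxs generalizing d chars with
  | nil => rfl
  | cons i rest ih =>
    have h1 : balStep d (chA s i) ≠ 0 := by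
      have := h 1 (by omega) (by simp)
      simpa [balFrom] using this
    have hstep : ∀ j, 1 ≤ j → j ≤ rest.length →
        balFrom (balStep d (chA s i)) ((rest.map (chA s)).take j) ≠ 0 := by
      intro j hj1 hj2
      have := h (j+1) (by omega) (by simp; omega)
      simpa [balFrom, List.take_succ_cons] using this
    by_cases hob : chA s i = '{'
    · simp only [pyA_loop, chA] at *
      rw [if_pos hob]
      exact ih _ _ (by omega) (by simpa [balStep, hob] using hstep)
    · by_cases hcb : chA s i = '}'
      · have hne : d - 1 ≠ 0 := by simpa [balStep, hcb, hob] using h1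
        simp only [pyA_loop, chA] at *
        rw [if_neg hob, if_pos hcb, if_neg (by omega : ¬ d - 1 < 0), if_neg hne]
        exact ih _ _ (by omega) (by simpa [balStep, hcb, hob] using hstep)
      · simp only [pyA_loop, chA] at *
        rw [if_neg hob, if_neg hcb, if_pos (by omega : d > 0)]
        exact ih _ _ hd (by simpa [balStep, hcb, hob] using hstep)

lemma pyA_loop_some (s : List Char) (idxs : List Int) (d : Int) (chars : List Char)
    (hd : 1 ≤ d)
    (h : ∃ j, 1 ≤ j ∧ j ≤ idxs.length ∧ balFrom d ((idxs.map (chA s)).take j) = 0) :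
    ∃ r k, pyA_loop s d chars idxs = (some r, some k) := by
  induction idxs generalizing d chars with
  | nil =>
    obtain ⟨j, hj1, hj2, _⟩ := h
    simp at hj2; omega
  | cons i rest ih =>
    obtain ⟨j, hj1, hj2, hj0⟩ := h
    by_cases h0 : balStep d (chA s i) = 0
    · have hcb : chA s i = '}' := by
        by_contra hcb
        by_cases hob : chA s i = '{'
        · simp [balStep, hob] at h0; omega
        · simp [balStep, hob, hcb] at h0; omega
      have hob : chA s i ≠ '{' := by simp [hcb]
      have hd1 : d = 1 := by
        rw [hcb] at h0; simp [balStep] at h0; omega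
      simp only [pyA_loop, chA] at *
      rw [if_neg hob, if_pos hcb, if_neg (by omega : ¬ d - 1 < 0), if_pos (by omega : d - 1 = 0)]
      exact ⟨_, _, rfl⟩
    · have hj2' : 2 ≤ j := by
        rcases Nat.lt_or_ge j 2 with h' | h'
        · interval_cases j
          exfalso; apply h0; simpa [balFrom] using hj0
        · exact h'
      have hrest : ∃ j', 1 ≤ j' ∧ j' ≤ rest.length ∧
          balFrom (balStep d (chA s i)) ((rest.map (chA s)).take j') = 0 := by
        refine ⟨j - 1, by omega, by simp at hj2; omega, ?_⟩
        have hj : j = (j-1) + 1 := by omega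
        rw [hj] at hj0
        simpa [balFrom, List.take_succ_cons] using hj0
      have hge : 1 ≤ balStep d (chA s i) := by
        unfold balStep at h0 ⊢; split_ifs at h0 ⊢ <;> omega
      by_cases hob : chA s i = '{'
      · have hb : balStep d (chA s i) = d + 1 := by simp [balStep, hob]
        rw [hb] at hrest hge
        simp only [pyA_loop, chA] at *
        rw [if_pos hob]
        exact ih _ _ hge hrest
      · by_cases hcb : chA s i = '}'
        · have hb : balStep d (chA s i) = d - 1 := by simp [balStep, hob, hcb]
          rw [hb] at hrest hge
          simp only [pyA_loop, chA] at *
          rw [if_neg hob, if_pos hcb, if_neg (by omega : ¬ d - 1 < 0), if_neg (by omega : ¬ d - 1 = 0)]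
          exact ih _ _ hge hrest
        · have hb : balStep d (chA s i) = d := by simp [balStep, hob, hcb]
          rw [hb] at hrest
          simp only [pyA_loop, chA] at *
          rw [if_neg hob, if_neg hcb, if_pos (by omega : d > 0)]
          exact ih _ _ hd hrest

lemma chA_natCast (s : List Char) (i : Nat) (h : i < s.length) : chA s (i : Int) = s[i] := by
  simp [chA, PySem.List.pyGet?_natCast, List.getElem?_eq_getElem h]

lemma pyRange_nil (a b : Int) (h : b ≤ a) : PySem.List.pyRange a b 1 = [] := by
  simp [PySem.List.pyRange]; omega

lemma map_chA_pyRange_nonneg (s : List Char) : ∀ (k i : Nat), s.length - i ≤ k →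
    (PySem.List.pyRange (i : Int) (s.length : Int) 1).map (chA s) = s.drop i := by
  intro k
  induction k with
  | zero =>
    intro i hk
    have hi : s.length ≤ i := by omega
    rw [pyRange_nil _ _ (by exact_mod_cast hi)]
    simp [List.drop_eq_nil_of_le hi]
  | succ k ih =>
    intro i hk
    by_cases hi : i < s.length
    · rw [PySem.List.pyRange_one_cons (by exact_mod_cast hi)]
      rw [List.map_cons, chA_natCast s i hi]
      have : ((i : Int) + 1) = ((i + 1 : Nat) : Int) := by push_cast; ring
      rw [this, ih (i+1) (by omega), List.drop_eq_getElem_cons hi]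
    · rw [pyRange_nil _ _ (by exact_mod_cast (by omega : s.length ≤ i))]
      simp [List.drop_eq_nil_of_le (by omega : s.length ≤ i)]

lemma chA_neg (s : List Char) (i : Int) (h1 : -(s.length : Int) ≤ i) (h2 : i < 0) :
    chA s i = s.getD ((s.length : Int) + i).toNat ' ' := by
  have h3 : ¬ (0 ≤ i) := by omega
  have h4 : (s.length - (-i).toNat) = ((s.length : Int) + i).toNat := by omega
  simp [chA, PySem.List.pyGet?, PySem.List.pyIdx?, h3, h1, h4, List.getD]

lemma map_chA_pyRange_neg (s : List Char) : ∀ (k : Nat) (i : Int), (-i).toNat ≤ k →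
    -(s.length : Int) ≤ i → i < 0 →
    (PySem.List.pyRange i (s.length : Int) 1).map (chA s)
      = s.drop ((s.length : Int) + i).toNat ++ s := by
  intro k
  induction k with
  | zero => intro i hk h1 h2; omega
  | succ k ih =>
    intro i hk h1 h2
    have hlen : 1 ≤ s.length := by omega
    have hp : ((s.length : Int) + i).toNat < s.length := by omega
    rw [PySem.List.pyRange_one_cons (by omega : i < (s.length : Int))]
    rw [List.map_cons, chA_neg s i h1 h2, List.getD_eq_getElem s ' ' hp,
        List.drop_eq_getElem_cons hp, List.cons_append]
    congr 1
    by_cases h0 : i + 1 = 0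
    · have : (PySem.List.pyRange (i+1) (s.length : Int) 1).map (chA s) = s := by
        rw [h0]
        have := map_chA_pyRange_nonneg s s.length 0 (by omega)
        simpa using this
      rw [this]
      have : ((s.length : Int) + i).toNat + 1 = s.length := by omega
      rw [this]
      simp
    · rw [ih (i+1) (by omega) (by omega) (by omega)]
      have : ((s.length : Int) + (i+1)).toNat = ((s.length : Int) + i).toNat + 1 := by omega
      rw [this]

lemma AB_loop (s : List Char) (start : Nat) : ∀ (k i : Nat) (d : Int), s.length - i ≤ k → start < i → 1 ≤ d →
    pyA_loop s d ((s.drop (start + 1)).take (i - (start + 1))) (PySem.List.pyRange (i : Int) (s.length : Int) 1)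
      = pyB_loop s start i d := by
  intro k
  induction k with
  | zero =>
    intro i d hk hsi hd
    have hi : s.length ≤ i := by omega
    rw [pyRange_nil _ _ (by exact_mod_cast hi), pyB_loop, dif_neg (by omega : ¬ i < s.length)]
    rfl
  | succ k ih =>
    intro i d hk hsi hd
    by_cases hi : i < s.length
    · rw [PySem.List.pyRange_one_cons (by exact_mod_cast hi)]
      rw [pyB_loop, dif_pos hi]
      have hch : (PySem.List.pyGet? s (i : Int)).getD ' ' = s[i] := chA_natCast s i hi
      have hcast : ((i : Int) + 1) = ((i + 1 : Nat) : Int) := by push_cast; ring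
      have htake : (s.drop (start + 1)).take (i - (start + 1)) ++ [s[i]]
          = (s.drop (start + 1)).take ((i + 1) - (start + 1)) := by
        have h1 : (i + 1) - (start + 1) = (i - (start + 1)) + 1 := by omega
        rw [h1, List.take_succ]
        have h2 : (s.drop (start + 1))[i - (start + 1)]? = some s[i] := by
          rw [List.getElem?_drop]
          have : start + 1 + (i - (start + 1)) = i := by omega
          rw [this, List.getElem?_eq_getElem hi]
        rw [h2]
        rfl
      have hslice : PySem.List.slice s (some ((start : Int) + 1)) (some (i : Int))
          = (s.drop (start + 1)).take (i - (start + 1)) := by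
        have h1 : ((start : Int) + 1) = ((start + 1 : Nat) : Int) := by push_cast; ring
        rw [h1, PySem.List.slice_natCast]
      simp only [pyA_loop, hch]
      by_cases hob : s[i] = '{'
      · rw [if_pos hob]
        have : ¬ (s[i] = '}' ∧ (if s[i] = '{' then d + 1 else if s[i] = '}' then d - 1 else d) = 0) := by
          simp [hob]
        rw [if_neg this]
        rw [if_pos (by omega : d > 0)]
        rw [htake, hcast, ih (i+1) (d+1) (by omega) (by omega) (by omega)]
        simp [hob]
      · by_cases hcb : s[i] = '}'
        · by_cases hd1 : d = 1
          · rw [if_neg hob, if_pos hcb, if_neg (by omega : ¬ d - 1 < 0), if_pos (by omega : d - 1 = 0)]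
            have : (s[i] = '}' ∧ (if s[i] = '{' then d + 1 else if s[i] = '}' then d - 1 else d) = 0) := by
              simp [hob, hcb]; omega
            rw [if_pos this, hslice]
          · rw [if_neg hob, if_pos hcb, if_neg (by omega : ¬ d - 1 < 0), if_neg (by omega : ¬ d - 1 = 0)]
            have : ¬ (s[i] = '}' ∧ (if s[i] = '{' then d + 1 else if s[i] = '}' then d - 1 else d) = 0) := by
              simp [hob, hcb]; omega
            rw [if_neg this]
            rw [htake, hcast, ih (i+1) (d-1) (by omega) (by omega) (by omega)]
            simp [hob, hcb]
        · rw [if_neg hob, if_neg hcb, if_pos (by omega : d > 0)]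
          have : ¬ (s[i] = '}' ∧ (if s[i] = '{' then d + 1 else if s[i] = '}' then d - 1 else d) = 0) := by
            simp [hcb]
          rw [if_neg this]
          rw [htake, hcast, ih (i+1) d (by omega) (by omega) hd]
          simp [hob, hcb]
    · rw [pyRange_nil _ _ (by exact_mod_cast (by omega : s.length ≤ i)), pyB_loop,
          dif_neg (by omega : ¬ i < s.length)]
      rfl

lemma pyGet?_neg (s : List Char) (i : Int) (h1 : -(s.length : Int) ≤ i) (h2 : i < 0) :
    PySem.List.pyGet? s i = s[((s.length : Int) + i).toNat]? := by
  have h3 : ¬ (0 ≤ i) := by omega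
  have h4 : (s.length - (-i).toNat) = ((s.length : Int) + i).toNat := by omega
  simp [PySem.List.pyGet?, PySem.List.pyIdx?, h3, h1, h4]

-- tail decomposition shared by the negative-start cases
lemma neg_setup (s : List Char) (i : Int) (h1 : -(s.length : Int) ≤ i) (h2 : i < 0) :
    (PySem.List.pyRange (i + 1) (s.length : Int) 1).map (chA s)
      = s.drop (((s.length : Int) + i).toNat + 1) ++ s := by
  by_cases h0 : i + 1 = 0
  · have hc : ((s.length : Int) + i).toNat + 1 = s.length := by omega
    rw [h0, hc]
    have := map_chA_pyRange_nonneg s s.length 0 (by omega)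
    simpa using this
  · rw [map_chA_pyRange_neg s (-(i+1)).toNat (i+1) (by omega) (by omega) (by omega)]
    have : ((s.length : Int) + (i + 1)).toNat = ((s.length : Int) + i).toNat + 1 := by omega
    rw [this]

lemma top_spec (text : String) (open_brace_index : Int)
    (hPre : Pre_extract_braced_content_py text open_brace_index)
    (hND : ¬ D_extract_braced_content_py text open_brace_index) :
    extract_braced_content_py text open_brace_index
      = extract_braced_content_py_alt text open_brace_index := by
  unfold Pre_extract_braced_content_py at hPre
  by_cases hge : (text.toList.length : Int) ≤ open_brace_index
  · rw [extract_braced_content_py, if_pos hge,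
        extract_braced_content_py_alt, if_neg (by omega : ¬ (0 ≤ open_brace_index ∧ open_brace_index < (text.toList.length : Int) ∧ text.toList.getD open_brace_index.toNat ' ' = '{'))]
  · by_cases hnn : 0 ≤ open_brace_index
    · -- nonnegative start
      have ht : open_brace_index = (open_brace_index.toNat : Int) := by omega
      have htl : open_brace_index.toNat < text.toList.length := by omega
      have hget : PySem.List.pyGet? text.toList open_brace_index
          = some (text.toList[open_brace_index.toNat]'htl) := by
        conv_lhs => rw [ht]
        rw [PySem.List.pyGet?_natCast, List.getElem?_eq_getElem htl]
      by_cases hbr : text.toList[open_brace_index.toNat]'htl = '{'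
      · rw [extract_braced_content_py, if_neg hge, hget, Option.getD_some]
        rw [if_neg (not_not_intro hbr)]
        rw [extract_braced_content_py_alt,
            if_pos ⟨hnn, by omega, by rw [List.getD_eq_getElem _ _ htl]; exact hbr⟩]
        rw [pyB_loop, dif_pos htl]
        rw [if_neg (by simp [hbr] : ¬ (text.toList[open_brace_index.toNat]'htl = '}' ∧ (if text.toList[open_brace_index.toNat]'htl = '{' then (0:Int) + 1 else if text.toList[open_brace_index.toNat]'htl = '}' then (0:Int) - 1 else 0) = 0))]
        rw [if_pos hbr]
        conv_lhs => rw [ht]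
        rw [PySem.List.pyRange_one_cons (by exact_mod_cast htl)]
        simp only [pyA_loop]
        rw [show ((PySem.List.pyGet? text.toList (open_brace_index.toNat : Int)).getD ' ') = text.toList[open_brace_index.toNat]'htl from chA_natCast _ _ htl]
        rw [if_pos hbr, if_neg (by omega : ¬ (0:Int) > 0)]
        have hcast : ((open_brace_index.toNat : Int) + 1) = ((open_brace_index.toNat + 1 : Nat) : Int) := by push_cast; ring
        rw [hcast]
        have h01 := AB_loop text.toList open_brace_index.toNat text.toList.length (open_brace_index.toNat + 1) (0+1) (by omega) (by omega) (by omega)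
        rw [Nat.sub_self, List.take_zero] at h01
        exact h01
      · rw [extract_braced_content_py, if_neg hge, hget, Option.getD_some]
        rw [if_pos hbr]
        rw [extract_braced_content_py_alt, if_neg]
        rintro ⟨-, -, hc⟩
        rw [List.getD_eq_getElem _ _ htl] at hc
        exact hbr hc
    · -- negative start
      have hneg : open_brace_index < 0 := by omega
      have hlen : 1 ≤ text.toList.length := by omega
      have hp : ((text.toList.length : Int) + open_brace_index).toNat < text.toList.length := by omega
      have hget : PySem.List.pyGet? text.toList open_brace_index
          = some (text.toList[((text.toList.length : Int) + open_brace_index).toNat]'hp) := by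
        rw [pyGet?_neg _ _ hPre hneg, List.getElem?_eq_getElem hp]
      rw [extract_braced_content_py, if_neg hge, hget, Option.getD_some,
          extract_braced_content_py_alt, if_neg (by omega : ¬ (0 ≤ open_brace_index ∧ open_brace_index < (text.toList.length : Int) ∧ text.toList.getD open_brace_index.toNat ' ' = '{'))]
      by_cases hbr : text.toList[((text.toList.length : Int) + open_brace_index).toNat]'hp = '{'
      · rw [if_neg (not_not_intro hbr)]
        rw [PySem.List.pyRange_one_cons (by omega : open_brace_index < (text.toList.length : Int))]
        simp only [pyA_loop]
        rw [show ((PySem.List.pyGet? text.toList open_brace_index).getD ' ') = text.toList[((text.toList.length : Int) + open_brace_index).toNat]'hp by rw [hget]; rfl]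
        rw [if_pos hbr, if_neg (by omega : ¬ (0:Int) > 0)]
        apply pyA_loop_none _ _ _ _ (by omega)
        rw [neg_setup _ _ hPre hneg]
        intro j hj1 hj2 heq
        apply hND
        refine ⟨hneg, hPre, ?_, ⟨j + 1, ?_, by omega, ?_⟩⟩
        · rw [List.drop_eq_getElem_cons hp, List.cons_append, List.head?_cons, hbr]
        · have hL := congrArg List.length (neg_setup _ _ hPre hneg)
          simp only [List.length_map, List.length_append, List.length_drop] at hL
          simp only [List.length_append, List.length_drop]
          omega
        · rw [List.drop_eq_getElem_cons hp, List.cons_append, List.take_succ_cons, hbr]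
          rw [balFrom_count] at heq
          simp at heq ⊢
          omega
      · rw [if_pos hbr]


lemma top_tight (text : String) (open_brace_index : Int)
    (hPre : Pre_extract_braced_content_py text open_brace_index)
    (hD : D_extract_braced_content_py text open_brace_index) :
    extract_braced_content_py text open_brace_index
      ≠ extract_braced_content_py_alt text open_brace_index := by
  unfold Pre_extract_braced_content_py at hPre
  obtain ⟨hneg, -, hhead, j, hjlt, hj1, hjc⟩ := hD
  have hge : ¬ (text.toList.length : Int) ≤ open_brace_index := by omega
  have hlen : 1 ≤ text.toList.length := by
    by_contra h
    have h0 : text.toList.length = 0 := by omega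
    omega
  have hp : ((text.toList.length : Int) + open_brace_index).toNat < text.toList.length := by omega
  have hget : PySem.List.pyGet? text.toList open_brace_index
      = some (text.toList[((text.toList.length : Int) + open_brace_index).toNat]'hp) := by
    rw [pyGet?_neg _ _ hPre hneg, List.getElem?_eq_getElem hp]
  have hbr : text.toList[((text.toList.length : Int) + open_brace_index).toNat]'hp = '{' := by
    rw [List.drop_eq_getElem_cons hp, List.cons_append, List.head?_cons] at hhead
    simpa using hhead
  rw [extract_braced_content_py, if_neg hge, hget, Option.getD_some,
      extract_braced_content_py_alt, if_neg (by omega : ¬ (0 ≤ open_brace_index ∧ open_brace_index < (text.toList.length : Int) ∧ text.toList.getD open_brace_index.toNat ' ' = '{'))]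
  rw [if_neg (not_not_intro hbr)]
  rw [PySem.List.pyRange_one_cons (by omega : open_brace_index < (text.toList.length : Int))]
  simp only [pyA_loop]
  rw [show ((PySem.List.pyGet? text.toList open_brace_index).getD ' ') = text.toList[((text.toList.length : Int) + open_brace_index).toNat]'hp by rw [hget]; rfl]
  rw [if_pos hbr, if_neg (by omega : ¬ (0:Int) > 0)]
  have hf1 : balFrom 0 ((text.toList.drop ((text.toList.length : Int) + open_brace_index).toNat ++ text.toList).take 1) = 1 := by
    rw [List.drop_eq_getElem_cons hp, List.cons_append, List.take_succ_cons, List.take_zero, hbr]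
    simp [balFrom, balStep]
  have hle : balFrom 0 ((text.toList.drop ((text.toList.length : Int) + open_brace_index).toNat ++ text.toList).take j) ≤ 0 := by
    rw [balFrom_count]; omega
  obtain ⟨m, hm1, hmj, hm0⟩ := bal_ivt _ hf1 j hj1 hle
  have hj2' : 2 ≤ m := by
    by_contra h
    have : m = 1 := by omega
    rw [this, hf1] at hm0
    omega
  have hsome : ∃ r k, pyA_loop text.toList (0+1) []
      (PySem.List.pyRange (open_brace_index + 1) (text.toList.length : Int) 1) = (some r, some k) := by
    apply pyA_loop_some _ _ _ _ (by omega)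
    rw [neg_setup _ _ hPre hneg]
    refine ⟨m - 1, by omega, ?_, ?_⟩
    · have hL := congrArg List.length (neg_setup _ _ hPre hneg)
      simp only [List.length_map, List.length_append, List.length_drop] at hL
      simp only [List.length_append, List.length_drop] at hjlt
      omega
    · rw [List.drop_eq_getElem_cons hp, List.cons_append] at hm0
      have hj : m = (m - 1) + 1 := by omega
      rw [hj, List.take_succ_cons, hbr] at hm0
      simpa [balFrom, balStep] using hm0
  obtain ⟨r, k, hsome⟩ := hsome
  rw [hsome]
  simp

-- ===== VERDICT (by name: the statement is the Claim_ definition above) =====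
theorem extract_braced_content_py_spec : Claim_unchanged_extract_braced_content_py := by
  intro text open_brace_index _ hPre hND
  exact top_spec text open_brace_index hPre hND

theorem extract_braced_content_py_changed : Claim_changed_extract_braced_content_py := by
  unfold Claim_changed_extract_braced_content_py; decide

theorem extract_braced_content_py_tight : Claim_exact_extract_braced_content_py := by
  intro text open_brace_index _ hPre hD
  exact top_tight text open_brace_index hPre hD
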